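-- pv_equiv track=rewrite | github.com/roeselfa/FeatureLearningBasedDistanceMetrics | Evaluation/AdvancedBA.py | getFollowersOfEventInTrace
-- ===== SOURCE A (Python) =====
-- def getFollowersOfEventInTrace(event, trace):
--     followers = list()
--     if event not in trace:
--         return followers
--     eventIndex = trace.index(event)
--     restTrace = trace[eventIndex + 1:]
--
--     for e in restTrace:
--         if e not in followers:
--             followers.append(e)
--
--     return followers
-- ===== SOURCE B (Python) =====
-- def getFollowersOfEventInTrace(event, trace):
--     i = 0
--     n = len(trace)
--     while i < n and trace[i] != event:
--         i += 1
--     rest = trace[i + 1:]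
--     followers = []
--     while rest:
--         head = rest[0]
--         followers.append(head)
--         rest = [x for x in rest[1:] if x != head]
--     return followers
-- ===== Notes on version B (the rewrite author's own statement) =====
-- stated objective: alternative
-- what changed: B replaces 'in'/.index with an explicit index scan and replaces the membership-test-and-append dedup with a peeling loop that takes the head and filters all its copies out of the remaining list, so no membership test or seen structure exists at all.
import Mathlib
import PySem

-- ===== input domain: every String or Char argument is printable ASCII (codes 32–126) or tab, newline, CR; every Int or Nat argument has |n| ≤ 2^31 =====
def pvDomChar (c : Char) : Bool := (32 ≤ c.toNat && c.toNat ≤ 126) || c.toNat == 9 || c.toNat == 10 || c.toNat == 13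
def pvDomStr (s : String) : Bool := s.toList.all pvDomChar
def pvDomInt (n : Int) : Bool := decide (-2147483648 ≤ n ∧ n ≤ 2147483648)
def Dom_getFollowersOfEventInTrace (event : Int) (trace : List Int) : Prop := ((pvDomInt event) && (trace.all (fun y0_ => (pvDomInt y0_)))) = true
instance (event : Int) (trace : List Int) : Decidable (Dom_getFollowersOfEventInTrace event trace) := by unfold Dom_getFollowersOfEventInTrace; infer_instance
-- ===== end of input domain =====

-- B finds the start by an explicit index scan and deduplicates by repeatedly taking the
-- head and filtering all its copies out of the remainder (no membership tests) — alternative decomposition.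


-- ===== PORT A =====
-- 'if e not in followers: followers.append(e)' — one step of A's dedup loop
def pvAppendUnique (followers : List Int) (e : Int) : List Int :=
  if e ∈ followers then followers else followers ++ [e]

def getFollowersOfEventInTrace (event : Int) (trace : List Int) : List Int :=
  if event ∈ trace then
    -- eventIndex = trace.index(event): the guard guarantees index? is some (getD 0 is never taken)
    let eventIndex : Nat := (PySem.List.index? trace event).getD 0
    -- restTrace = trace[eventIndex + 1:]
    let restTrace := PySem.List.slice trace (some ((eventIndex : Int) + 1)) none
    restTrace.foldl pvAppendUnique []
  else []

-- ===== PORT B =====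
-- 'while i < n and trace[i] != event: i += 1' — trace[i] is total here thanks to the i < n guard
def pvScan (event : Int) (trace : List Int) (i : Nat) : Nat :=
  if i < trace.length then
    if trace.getD i 0 = event then i else pvScan event trace (i + 1)
  else i
termination_by trace.length - i

-- 'while rest: head = rest[0]; followers.append(head); rest = [x for x in rest[1:] if x != head]'
def pvPeel : List Int → List Int
  | [] => []
  | h :: t => h :: pvPeel (t.filter (fun x => x ≠ h))
termination_by l => l.length
decreasing_by
  simp only [List.length_cons, Nat.lt_succ_iff, List.length_unattach]
  exact le_trans (List.length_filter_le _ _) (by simp)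

def getFollowersOfEventInTrace_alt (event : Int) (trace : List Int) : List Int :=
  pvPeel (PySem.List.slice trace (some (((pvScan event trace 0 : Nat) : Int) + 1)) none)

-- ===== PRECONDITION & SPEC =====
def Spec_getFollowersOfEventInTrace (event : Int) (trace : List Int) (out : List Int) : Prop := out = getFollowersOfEventInTrace_alt event trace
instance (event : Int) (trace : List Int) (out : List Int) : Decidable (Spec_getFollowersOfEventInTrace event trace out) := by unfold Spec_getFollowersOfEventInTrace; infer_instance

-- ===== CLAIM (what is proved, stated in full; the proofs are below) =====
def Claim_equal_getFollowersOfEventInTrace : Prop := ∀ (event : Int) (trace : List Int), Dom_getFollowersOfEventInTrace event trace → Spec_getFollowersOfEventInTrace event trace (getFollowersOfEventInTrace event trace)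

-- ===== LEMMAS AND PROOFS =====

-- one-step unfolding of pvScan / pvPeel (their equation lemmas unfold recursively under plain rw)
lemma pvScan_eq (event : Int) (trace : List Int) (i : Nat) :
    pvScan event trace i
      = if i < trace.length then
          (if trace.getD i 0 = event then i else pvScan event trace (i + 1))
        else i := by
  conv_lhs => rw [pvScan]

lemma pvPeel_nil : pvPeel [] = [] := by rw [pvPeel]

lemma pvPeel_cons (h : Int) (t : List Int) :
    pvPeel (h :: t) = h :: pvPeel (t.filter (fun x => x ≠ h)) := by
  conv_lhs => rw [pvPeel]

-- scanning (h :: t) from index i+1 is scanning t from index i, shifted by one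
lemma pvScan_shift (event h : Int) (t : List Int) :
    ∀ k i, t.length - i ≤ k → pvScan event (h :: t) (i + 1) = pvScan event t i + 1 := by
  intro k
  induction k with
  | zero =>
    intro i hi
    rw [pvScan_eq event (h :: t) (i + 1), pvScan_eq event t i]
    have h1 : ¬ i < t.length := by omega
    have h2 : ¬ i + 1 < (h :: t).length := by simp; omega
    rw [if_neg h2, if_neg h1]
  | succ k ih =>
    intro i hi
    rw [pvScan_eq event (h :: t) (i + 1), pvScan_eq event t i]
    by_cases hlt : i < t.length
    · have hlt' : i + 1 < (h :: t).length := by simp; omega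
      rw [if_pos hlt', if_pos hlt, List.getD_cons_succ]
      by_cases he : t.getD i 0 = event
      · rw [if_pos he, if_pos he]
      · rw [if_neg he, if_neg he]
        exact ih (i + 1) (by omega)
    · have hlt' : ¬ i + 1 < (h :: t).length := by simp; omega
      rw [if_neg hlt', if_neg hlt]

-- the scan from 0 finds the first index of event when it occurs …
lemma pvScan_mem (event : Int) : ∀ (l : List Int), event ∈ l →
    pvScan event l 0 = (PySem.List.index? l event).getD 0 := by
  intro l
  induction l with
  | nil => intro h; cases h
  | cons h t ih =>
    intro hmem
    rw [pvScan_eq]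
    have h0 : 0 < (h :: t).length := by simp
    rw [if_pos h0]
    by_cases he : h = event
    · rw [if_pos (by simpa using he)]
      subst he
      rw [PySem.List.index?_cons_self]
      rfl
    · rw [if_neg (by simpa using he)]
      have hmem' : event ∈ t := by
        rcases List.mem_cons.mp hmem with h1 | h1
        · exact absurd h1.symm he
        · exact h1
      rw [pvScan_shift event h t t.length 0 (by omega), ih hmem',
        PySem.List.index?_cons_of_ne t he]
      rcases Option.isSome_iff_exists.mp ((PySem.List.index?_isSome_iff t event).mpr hmem') with ⟨j, hj⟩
      rw [hj]
      rfl

-- … and returns the length when it does not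
lemma pvScan_not_mem (event : Int) : ∀ (l : List Int), event ∉ l → pvScan event l 0 = l.length := by
  intro l
  induction l with
  | nil => intro _; rw [pvScan_eq]; simp
  | cons h t ih =>
    intro hmem
    rw [pvScan_eq]
    have h0 : 0 < (h :: t).length := by simp
    have hne : ¬ ((h :: t).getD 0 0 = event) := by
      simp only [List.getD_cons_zero]
      intro he; exact hmem (he ▸ List.mem_cons_self)
    rw [if_pos h0, if_neg hne,
      pvScan_shift event h t t.length 0 (by omega),
      ih (fun hm => hmem (List.mem_cons_of_mem _ hm))]
    simp

-- A's membership-append fold equals B's peel-and-filter dedup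
lemma foldl_eq_peel : ∀ (xs acc : List Int),
    xs.foldl pvAppendUnique acc = acc ++ pvPeel (xs.filter (fun x => !decide (x ∈ acc))) := by
  intro xs
  induction xs with
  | nil => intro acc; simp [pvPeel_nil]
  | cons h t ih =>
    intro acc
    rw [List.foldl_cons, pvAppendUnique]
    by_cases hmem : h ∈ acc
    · rw [if_pos hmem, List.filter_cons_of_neg (by simpa using hmem)]
      exact ih acc
    · rw [if_neg hmem, List.filter_cons_of_pos (by simpa using hmem), pvPeel_cons, ih (acc ++ [h])]
      have hpred : (t.filter (fun x => !decide (x ∈ acc))).filter (fun x => x ≠ h)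
          = t.filter (fun x => !decide (x ∈ acc ++ [h])) := by
        rw [List.filter_filter]
        apply List.filter_congr
        intro x _
        by_cases h1 : x = h <;> by_cases h2 : x ∈ acc <;> simp [h1, h2]
      rw [← hpred]
      simp

lemma AB_eq (event : Int) (trace : List Int) :
    getFollowersOfEventInTrace event trace = getFollowersOfEventInTrace_alt event trace := by
  unfold getFollowersOfEventInTrace getFollowersOfEventInTrace_alt
  by_cases hmem : event ∈ trace
  · rw [if_pos hmem, pvScan_mem event trace hmem]
    rw [foldl_eq_peel]
    simp
  · rw [if_neg hmem, pvScan_not_mem event trace hmem]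
    have : ((trace.length : Int) + 1) = ((trace.length + 1 : Nat) : Int) := by push_cast; ring
    rw [this, PySem.List.slice_from_natCast]
    rw [List.drop_eq_nil_of_le (by omega), pvPeel_nil]

-- ===== VERDICT (by name: the statement is the Claim_ definition above) =====
theorem getFollowersOfEventInTrace_spec : Claim_equal_getFollowersOfEventInTrace := by
  intro event trace _
  exact AB_eq event trace
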